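-- pv_equiv track=rewrite | github.com/kunalsdas/PDSA | greedy_1.py | count
-- ===== SOURCE A (Python) =====
-- def count(meetings):
--     start=[]
--     end=[]
--     for meet in meetings:
--         start.append(meet[0])
--         end.append(meet[1])
--     start.sort()
--     end.sort()
--     count=0
--     end_index=0
--     for i in start:
--         if i>=end[end_index]:
--             end_index+=1
--         else:
--             count+=1
--     return count
-- ===== SOURCE B (Python) =====
-- def count(meetings):
--     best = 0
--     for m in meetings:
--         t = m[0]
--         c = 0
--         for x in meetings:
--             if x[0] <= t:
--                 c += 1
--             if x[1] <= t:
--                 c -= 1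
--         if c > best:
--             best = c
--     return best
-- ===== Notes on version B (the rewrite author's own statement) =====
-- stated objective: alternative
-- what changed: Replaced the sort-both-lists two-pointer greedy by a direct quadratic scan: for each meeting's start time t, count meetings already started (start <= t) minus meetings already ended (end <= t), and return the maximum of these balances and 0 — no sorting, no pointer state.
import Mathlib
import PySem

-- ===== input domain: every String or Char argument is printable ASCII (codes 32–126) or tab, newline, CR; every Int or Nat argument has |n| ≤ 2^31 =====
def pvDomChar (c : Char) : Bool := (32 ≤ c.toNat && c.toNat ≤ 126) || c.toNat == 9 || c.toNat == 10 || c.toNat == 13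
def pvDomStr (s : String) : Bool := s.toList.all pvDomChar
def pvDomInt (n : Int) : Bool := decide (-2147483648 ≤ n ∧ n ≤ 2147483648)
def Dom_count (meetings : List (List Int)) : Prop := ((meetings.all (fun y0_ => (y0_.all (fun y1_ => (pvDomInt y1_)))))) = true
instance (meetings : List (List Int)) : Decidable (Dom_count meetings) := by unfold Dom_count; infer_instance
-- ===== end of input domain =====

-- B replaces A's sort-both-lists two-pointer greedy by a direct quadratic scan
-- (max over start times t of #starts ≤ t minus #ends ≤ t, floored at 0): a different
-- algorithm of similar size, not claimed faster.


-- ===== PORT A =====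
-- the 'for i in start' loop; end_index is represented by the remaining suffix of the
-- sorted end list.  The [] end-list case is unreachable on Pre_ inputs (end_index
-- never overtakes i in A, the two lists having equal length).
def countLoopA : List Int → List Int → Int → Int
  | [], _, cnt => cnt
  | _ :: _, [], cnt => cnt
  | i :: s, y :: e, cnt =>
      if i ≥ y then countLoopA s e cnt else countLoopA s (y :: e) (cnt + 1)

def count (meetings : List (List Int)) : Int :=
  -- start=[]; end=[]; for meet in meetings: start.append(meet[0]); end.append(meet[1])
  let se := meetings.foldl
    (fun (p : List Int × List Int) meet =>
      (p.1 ++ [PySem.List.pyGetD meet 0 0], p.2 ++ [PySem.List.pyGetD meet 1 0]))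
    ([], [])
  let start := PySem.List.sorted se.1 (fun x => x) false
  let endl := PySem.List.sorted se.2 (fun x => x) false
  countLoopA start endl 0

-- ===== PORT B =====
def count_alt (meetings : List (List Int)) : Int :=
  meetings.foldl
    (fun best m =>
      let t := PySem.List.pyGetD m 0 0
      let c := meetings.foldl
        (fun c x =>
          let c := if PySem.List.pyGetD x 0 0 ≤ t then c + 1 else c
          if PySem.List.pyGetD x 1 0 ≤ t then c - 1 else c)
        0
      if c > best then c else best)
    0

-- ===== PRECONDITION & SPEC =====
-- Pre_ excludes exactly the inputs where Python A raises IndexError: a meeting with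
-- fewer than two entries (meet[0] / meet[1]).
def Pre_count (meetings : List (List Int)) : Prop := ∀ m ∈ meetings, 2 ≤ m.length
instance (meetings : List (List Int)) : Decidable (Pre_count meetings) := by
  unfold Pre_count; infer_instance

def pvWitness_count : List (List Int) := [[0, 5], [3, 9], [5, 5]]

def Spec_count (meetings : List (List Int)) (out : Int) : Prop := out = count_alt meetings
instance (meetings : List (List Int)) (out : Int) : Decidable (Spec_count meetings out) := by
  unfold Spec_count; infer_instance

-- ===== CLAIM (what is proved, stated in full; the proofs are below) =====
def Claim_equal_count : Prop :=
  ∀ (meetings : List (List Int)), Dom_count meetings → Pre_count meetings →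
    Spec_count meetings (count meetings)

-- ===== LEMMAS AND PROOFS =====

-- number of elements of l that are ≤ t, as an Int
def cLe (t : Int) (l : List Int) : Int := (l.countP (fun a => decide (a ≤ t)) : Int)

-- the balance at threshold t: #starts ≤ t − #ends ≤ t
def dle (S E : List Int) (t : Int) : Int := cLe t S - cLe t E

-- max of f over l, floored by the accumulator
def bmax (f : Int → Int) (b : Int) (l : List Int) : Int :=
  l.foldl (fun b t => max b (f t)) b

theorem cLe_cons (t a : Int) (l : List Int) :
    cLe t (a :: l) = if a ≤ t then cLe t l + 1 else cLe t l := by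
  simp [cLe, List.countP_cons]
  split_ifs <;> simp_all

theorem cLe_nonneg (t : Int) (l : List Int) : 0 ≤ cLe t l := by
  simp [cLe]

theorem cLe_eq_zero (t : Int) (l : List Int) (h : ∀ a ∈ l, t < a) : cLe t l = 0 := by
  simp [cLe, List.countP_eq_zero]
  exact h

theorem cLe_pos_mem (t : Int) (l : List Int) (h : 0 < cLe t l) : ∃ a ∈ l, a ≤ t := by
  simp only [cLe] at h
  have : 0 < l.countP (fun a => decide (a ≤ t)) := by exact_mod_cast h
  obtain ⟨a, ha, hp⟩ := List.countP_pos_iff.mp this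
  exact ⟨a, ha, of_decide_eq_true hp⟩

theorem bmax_shift (f : Int → Int) (l : List Int) :
    ∀ b c, bmax f (max b c) l = max b (bmax f c l) := by
  induction l with
  | nil => intro b c; simp [bmax]
  | cons x l ih =>
      intro b c
      simp only [bmax, List.foldl_cons]
      have : max (max b c) (f x) = max b (max c (f x)) := max_assoc b c (f x)
      rw [this]
      exact ih b (max c (f x))

theorem bmax_cons (f : Int → Int) (x : Int) (l : List Int) :
    bmax f 0 (x :: l) = max (f x) (bmax f 0 l) := by
  have h : bmax f (max (f x) 0) l = max (f x) (bmax f 0 l) := bmax_shift f l (f x) 0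
  simpa [bmax, max_comm] using h

theorem bmax_nonneg (f : Int → Int) (l : List Int) : 0 ≤ bmax f 0 l := by
  induction l with
  | nil => simp [bmax]
  | cons x l ih => rw [bmax_cons]; exact le_trans ih (le_max_right _ _)

theorem le_bmax_of_mem (f : Int → Int) (l : List Int) (t : Int) (ht : t ∈ l) :
    f t ≤ bmax f 0 l := by
  induction l with
  | nil => cases ht
  | cons x l ih =>
      rw [bmax_cons]
      rcases List.mem_cons.mp ht with h | h
      · subst h; exact le_max_left _ _
      · exact le_trans (ih h) (le_max_right _ _)

theorem bmax_le (f : Int → Int) (l : List Int) (M : Int)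
    (hM : 0 ≤ M) (h : ∀ t ∈ l, f t ≤ M) : bmax f 0 l ≤ M := by
  induction l with
  | nil => simpa [bmax]
  | cons x l ih =>
      rw [bmax_cons]
      exact max_le (h x (List.mem_cons_self)) (ih (fun t ht => h t (List.mem_cons_of_mem _ ht)))

theorem bmax_attain (f : Int → Int) (l : List Int) :
    bmax f 0 l = 0 ∨ ∃ t ∈ l, bmax f 0 l = f t := by
  induction l with
  | nil => left; simp [bmax]
  | cons x l ih =>
      rw [bmax_cons]
      rcases max_cases (f x) (bmax f 0 l) with ⟨he, _⟩ | ⟨he, _⟩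
      · right; exact ⟨x, List.mem_cons_self, he⟩
      · rw [he]
        rcases ih with h | ⟨t, ht, he'⟩
        · left; exact h
        · right; exact ⟨t, List.mem_cons_of_mem _ ht, he'⟩

theorem bmax_congr (f g : Int → Int) (l : List Int)
    (h : ∀ t ∈ l, f t = g t) : bmax f 0 l = bmax g 0 l := by
  induction l with
  | nil => rfl
  | cons x l ih =>
      rw [bmax_cons, bmax_cons, h x List.mem_cons_self,
        ih (fun t ht => h t (List.mem_cons_of_mem _ ht))]

theorem bmax_le_of_subset (f : Int → Int) (l l' : List Int)
    (h : ∀ t ∈ l, t ∈ l') : bmax f 0 l ≤ bmax f 0 l' := by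
  exact bmax_le f l _ (bmax_nonneg f l') (fun t ht => le_bmax_of_mem f l' t (h t ht))

theorem bmax_eq_of_mem_iff (f : Int → Int) (l l' : List Int)
    (h : ∀ t, t ∈ l ↔ t ∈ l') : bmax f 0 l = bmax f 0 l' :=
  le_antisymm (bmax_le_of_subset f l l' (fun t ht => (h t).mp ht))
    (bmax_le_of_subset f l' l (fun t ht => (h t).mpr ht))

theorem countLoopA_acc : ∀ (s e : List Int) (c : Int),
    countLoopA s e c = c + countLoopA s e 0 := by
  intro s
  induction s with
  | nil => intro e c; simp [countLoopA]
  | cons x s ih =>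
      intro e c
      cases e with
      | nil => simp [countLoopA]
      | cons y e =>
          simp only [countLoopA]
          split_ifs with h
          · exact ih e c
          · rw [ih (y :: e) (c + 1), ih (y :: e) (0 + 1)]; ring

-- the heart: A's greedy two-pointer loop on the sorted lists computes the
-- max-balance spec (over thresholds drawn from the start list), floored at 0
theorem countLoopA_eq_bmax : ∀ (s e : List Int),
    s.Pairwise (· ≤ ·) → e.Pairwise (· ≤ ·) → s.length ≤ e.length →
    countLoopA s e 0 = bmax (dle s e) 0 s := by
  intro s
  induction s with
  | nil => intro e _ _ _; simp [countLoopA, bmax]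
  | cons x s ih =>
      intro e hs he hlen
      cases e with
      | nil => simp at hlen
      | cons y e =>
          have hxs : ∀ t ∈ s, x ≤ t := fun t ht => List.rel_of_pairwise_cons hs ht
          have hye : ∀ u ∈ e, y ≤ u := fun u hu => List.rel_of_pairwise_cons he hu
          have hs' : s.Pairwise (· ≤ ·) := hs.of_cons
          have he' : e.Pairwise (· ≤ ·) := he.of_cons
          simp only [countLoopA]
          split_ifs with hxy
          · -- x ≥ y : match this start with the earliest end; the instance shrinks on both sides
            rw [ih e hs' he' (by simpa using hlen)]
            have hcongr : ∀ t ∈ s, dle (x :: s) (y :: e) t = dle s e t := by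
              intro t ht
              have hx : x ≤ t := hxs t ht
              have hy : y ≤ t := le_trans hxy hx
              simp [dle, cLe_cons, hx, hy]
            rw [bmax_cons, bmax_congr _ _ s hcongr]
            -- show the extra threshold x does not exceed the smaller instance's best
            have hxle : dle (x :: s) (y :: e) x ≤ bmax (dle s e) 0 s := by
              have hdx : dle (x :: s) (y :: e) x = cLe x s - cLe x e := by
                simp [dle, cLe_cons, hxy]
              rcases lt_or_eq_of_le (cLe_nonneg x s) with hpos | hzero
              · obtain ⟨a, ha, hax⟩ := cLe_pos_mem x s hpos
                have hax' : a = x := le_antisymm hax (hxs a ha)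
                subst hax'
                have : dle s e a = cLe a s - cLe a e := rfl
                rw [hdx]
                exact le_bmax_of_mem (dle s e) s a ha
              · rw [hdx, ← hzero]
                have := cLe_nonneg x e
                have := bmax_nonneg (dle s e) s
                omega
            exact (max_eq_right hxle).symm
          · -- x < y : this start is strictly before every end; it adds one to the best
            rw [not_le] at hxy
            rw [countLoopA_acc, ih (y :: e) hs' he (by simp at hlen ⊢; omega)]
            rw [bmax_cons, bmax_congr (dle (x :: s) (y :: e)) (fun t => 1 + dle s (y :: e) t) s
              (by
                intro t ht
                have hx : x ≤ t := hxs t ht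
                simp [dle, cLe_cons, hx]
                ring)]
            have hEx : cLe x (y :: e) = 0 := by
              refine cLe_eq_zero x (y :: e) ?_
              intro a ha
              rcases List.mem_cons.mp ha with h | h
              · omega
              · have := hye a h; omega
            have hdx : dle (x :: s) (y :: e) x = 1 + cLe x s := by
              simp [dle, cLe_cons, hEx]
              ring
            set M := bmax (dle s (y :: e)) 0 s with hM
            have hMnn : 0 ≤ M := bmax_nonneg _ _
            -- cLe x s ≤ M
            have hcle : cLe x s ≤ M := by
              rcases lt_or_eq_of_le (cLe_nonneg x s) with hpos | hzero
              · obtain ⟨a, ha, hax⟩ := cLe_pos_mem x s hpos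
                have hax' : a = x := le_antisymm hax (hxs a ha)
                subst hax'
                have hda : dle s (y :: e) a = cLe a s := by simp [dle, hEx]
                have := le_bmax_of_mem (dle s (y :: e)) s a ha
                omega
              · omega
            -- upper bound
            have hub : bmax (fun t => 1 + dle s (y :: e) t) 0 s ≤ 1 + M := by
              refine bmax_le _ s (1 + M) (by omega) ?_
              intro t ht
              have := le_bmax_of_mem (dle s (y :: e)) s t ht
              omega
            -- lower bound
            have hlb : 1 + M ≤ max (dle (x :: s) (y :: e) x) (bmax (fun t => 1 + dle s (y :: e) t) 0 s) := by
              rcases bmax_attain (dle s (y :: e)) s with h0 | ⟨t, ht, hte⟩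
              · have : 1 + M ≤ dle (x :: s) (y :: e) x := by
                  rw [hdx]; have := cLe_nonneg x s; omega
                exact le_trans this (le_max_left _ _)
              · have : 1 + M ≤ bmax (fun t => 1 + dle s (y :: e) t) 0 s := by
                  have h2 : 1 + dle s (y :: e) t ≤ bmax (fun u => 1 + dle s (y :: e) u) 0 s :=
                    le_bmax_of_mem _ s t ht
                  omega
                exact le_trans this (le_max_right _ _)
            have hub' : max (dle (x :: s) (y :: e) x) (bmax (fun t => 1 + dle s (y :: e) t) 0 s) ≤ 1 + M := by
              refine max_le ?_ hub
              rw [hdx]; omega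
            omega

-- A's list-building loop over the pair accumulator builds the two maps
theorem buildPair (l : List (List Int)) : ∀ (a b : List Int),
    l.foldl (fun (p : List Int × List Int) meet =>
      (p.1 ++ [PySem.List.pyGetD meet 0 0], p.2 ++ [PySem.List.pyGetD meet 1 0])) (a, b)
    = (a ++ l.map (fun m => PySem.List.pyGetD m 0 0),
       b ++ l.map (fun m => PySem.List.pyGetD m 1 0)) := by
  induction l with
  | nil => intro a b; simp
  | cons m l ih => intro a b; simp [ih]

-- B's inner loop computes the balance at threshold t
theorem innerLoop (t : Int) (l : List (List Int)) : ∀ (c : Int),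
    l.foldl (fun c x =>
        let c := if PySem.List.pyGetD x 0 0 ≤ t then c + 1 else c
        if PySem.List.pyGetD x 1 0 ≤ t then c - 1 else c) c
    = c + cLe t (l.map (fun m => PySem.List.pyGetD m 0 0))
        - cLe t (l.map (fun m => PySem.List.pyGetD m 1 0)) := by
  induction l with
  | nil => intro c; simp
  | cons x l ih =>
      intro c
      simp only [List.foldl_cons, List.map_cons, cLe_cons]
      rw [ih]
      split_ifs <;> ring

theorem if_gt_eq_max (b c : Int) : (if c > b then c else b) = max b c := by
  rw [max_def]; split_ifs <;> omega

theorem count_eq_bmax (meetings : List (List Int)) :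
    count meetings
      = bmax (dle (meetings.map (fun m => PySem.List.pyGetD m 0 0))
                  (meetings.map (fun m => PySem.List.pyGetD m 1 0))) 0
             (meetings.map (fun m => PySem.List.pyGetD m 0 0)) := by
  have h1 : count meetings
      = countLoopA
          (PySem.List.sorted (meetings.map (fun m => PySem.List.pyGetD m 0 0)) (fun x => x) false)
          (PySem.List.sorted (meetings.map (fun m => PySem.List.pyGetD m 1 0)) (fun x => x) false) 0 := by
    simp [count, buildPair]
  rw [h1, countLoopA_eq_bmax _ _
      (PySem.List.sorted_pairwise _ (fun x => x))
      (PySem.List.sorted_pairwise _ (fun x => x))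
      (by simp [PySem.List.length_sorted])]
  have hcnt : ∀ t l, cLe t (PySem.List.sorted l (fun x : Int => x) false) = cLe t l := by
    intro t l
    simp [cLe, (PySem.List.sorted_perm l (fun x : Int => x) false).countP_eq]
  have hcongr : ∀ t ∈ PySem.List.sorted (meetings.map (fun m => PySem.List.pyGetD m 0 0)) (fun x => x) false,
      dle (PySem.List.sorted (meetings.map (fun m => PySem.List.pyGetD m 0 0)) (fun x => x) false)
          (PySem.List.sorted (meetings.map (fun m => PySem.List.pyGetD m 1 0)) (fun x => x) false) t
        = dle (meetings.map (fun m => PySem.List.pyGetD m 0 0)) (meetings.map (fun m => PySem.List.pyGetD m 1 0)) t := by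
    intro t _
    simp [dle, hcnt]
  rw [bmax_congr _ _ _ hcongr]
  exact bmax_eq_of_mem_iff _ _ _ (fun t => PySem.List.mem_sorted _ _ _ _)

theorem count_alt_eq_bmax (meetings : List (List Int)) :
    count_alt meetings
      = bmax (dle (meetings.map (fun m => PySem.List.pyGetD m 0 0))
                  (meetings.map (fun m => PySem.List.pyGetD m 1 0))) 0
             (meetings.map (fun m => PySem.List.pyGetD m 0 0)) := by
  simp only [count_alt, bmax]
  rw [List.foldl_map]
  congr 1
  funext best m
  rw [innerLoop, if_gt_eq_max]
  simp [dle]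

-- ===== VERDICT (by name: the statement is the Claim_ definition above) =====
theorem count_spec : Claim_equal_count := by
  intro meetings _ _
  unfold Spec_count
  rw [count_eq_bmax, count_alt_eq_bmax]
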